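-- pv_equiv track=rewrite | github.com/anupyadav27/threat-engine | compliance/aws/backups/map_encryption_functions.py | create_encryption_mappings
-- ===== SOURCE A (Python) =====
-- def create_encryption_mappings(rule_ids):
--     """Create proper encryption function mappings"""
--
--     # User's suggested encryption checks with proper improved names
--     encryption_checks = {
--         "aws_ebs_encryption_by_default_enabled_check": {
--             "improved_function": "aws.ec2.ebs.encryption_by_default_enabled",
--             "search_patterns": ["aws.ec2.resource.ebs_encryption_by_default_enabled", "aws.ec2.ebs.default_encryption"]
--         },
--         "aws_s3_bucket_default_encryption_enabled_check": {
--             "improved_function": "aws.s3.bucket.default_encryption_enabled",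
--             "search_patterns": ["aws.s3.bucket.encryption", "aws.s3.bucket.default_encryption"]
--         },
--         "aws_rds_encryption_enabled_check": {
--             "improved_function": "aws.rds.instance.encryption_at_rest_enabled",
--             "search_patterns": ["aws.rds.instance.encryption", "aws.rds.db.encryption"]
--         },
--         "aws_efs_encryption_enabled_check": {
--             "improved_function": "aws.efs.filesystem.encryption_at_rest_enabled",
--             "search_patterns": ["aws.efs.filesystem.encryption", "aws.efs.resource.encryption"]
--         }
--     }
--
--     # Find matching rule_ids
--     mappings = {}
--
--     for original, data in encryption_checks.items():
--         improved = data['improved_function']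
--         matched_rule = None
--
--         # Try exact patterns first
--         for pattern in data['search_patterns']:
--             matching_rules = [r for r in rule_ids if pattern in r]
--             if matching_rules:
--                 matched_rule = matching_rules[0]
--                 break
--
--         mappings[original] = {
--             'improved_function': improved,
--             'matched_rule_id': matched_rule,
--             'confidence': 'high' if matched_rule else None,
--             'notes': f'Encryption at rest enabled for {improved.split(".")[1]}'
--         }
--
--     return mappings
-- ===== SOURCE B (Python) =====
-- CHECKS = [
--     ("aws_ebs_encryption_by_default_enabled_check",
--      "aws.ec2.ebs.encryption_by_default_enabled",
--      ["aws.ec2.resource.ebs_encryption_by_default_enabled", "aws.ec2.ebs.default_encryption"]),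
--     ("aws_s3_bucket_default_encryption_enabled_check",
--      "aws.s3.bucket.default_encryption_enabled",
--      ["aws.s3.bucket.encryption", "aws.s3.bucket.default_encryption"]),
--     ("aws_rds_encryption_enabled_check",
--      "aws.rds.instance.encryption_at_rest_enabled",
--      ["aws.rds.instance.encryption", "aws.rds.db.encryption"]),
--     ("aws_efs_encryption_enabled_check",
--      "aws.efs.filesystem.encryption_at_rest_enabled",
--      ["aws.efs.filesystem.encryption", "aws.efs.resource.encryption"]),
-- ]
--
--
-- def create_encryption_mappings(rule_ids):
--     """Create proper encryption function mappings (index-based)."""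
--     # One pass over rule_ids: map each pattern to the FIRST rule containing it.
--     index = {}
--     for r in rule_ids:
--         for _, _, patterns in CHECKS:
--             for p in patterns:
--                 if p not in index and p in r:
--                     index[p] = r
--
--     mappings = {}
--     for original, improved, patterns in CHECKS:
--         matched_rule = None
--         for p in patterns:
--             if p in index:
--                 matched_rule = index[p]
--                 break
--         mappings[original] = {
--             'improved_function': improved,
--             'matched_rule_id': matched_rule,
--             'confidence': 'high' if matched_rule else None,
--             'notes': f'Encryption at rest enabled for {improved.split(".")[1]}'
--         }
--     return mappings
-- ===== Notes on version B (the rewrite author's own statement) =====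
-- stated objective: alternative
-- what changed: B replaces A's per-check, per-pattern rescans of rule_ids (a fresh list comprehension for every pattern) with a single pass over rule_ids that builds a pattern->first-matching-rule index dict, after which each check just looks its patterns up in the index.
import Mathlib
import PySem

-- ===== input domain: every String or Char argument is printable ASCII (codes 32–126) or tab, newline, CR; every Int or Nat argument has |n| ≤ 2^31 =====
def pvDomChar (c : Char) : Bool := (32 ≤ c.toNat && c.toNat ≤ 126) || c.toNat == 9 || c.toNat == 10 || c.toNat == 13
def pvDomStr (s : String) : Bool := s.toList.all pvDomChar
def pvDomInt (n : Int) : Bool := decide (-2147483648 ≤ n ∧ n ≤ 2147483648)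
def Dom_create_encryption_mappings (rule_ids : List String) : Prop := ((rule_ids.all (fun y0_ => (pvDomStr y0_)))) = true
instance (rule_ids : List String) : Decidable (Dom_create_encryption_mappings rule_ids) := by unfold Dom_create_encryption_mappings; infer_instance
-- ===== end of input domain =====

-- B builds a pattern->first-matching-rule index in one pass over rule_ids instead of
-- re-scanning rule_ids for every pattern of every check (alternative decomposition).


-- the fixed encryption_checks table: (original, improved_function, search_patterns)
def pvChecks : List (String × String × List String) :=
  [ ("aws_ebs_encryption_by_default_enabled_check",
     "aws.ec2.ebs.encryption_by_default_enabled",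
     ["aws.ec2.resource.ebs_encryption_by_default_enabled", "aws.ec2.ebs.default_encryption"]),
    ("aws_s3_bucket_default_encryption_enabled_check",
     "aws.s3.bucket.default_encryption_enabled",
     ["aws.s3.bucket.encryption", "aws.s3.bucket.default_encryption"]),
    ("aws_rds_encryption_enabled_check",
     "aws.rds.instance.encryption_at_rest_enabled",
     ["aws.rds.instance.encryption", "aws.rds.db.encryption"]),
    ("aws_efs_encryption_enabled_check",
     "aws.efs.filesystem.encryption_at_rest_enabled",
     ["aws.efs.filesystem.encryption", "aws.efs.resource.encryption"]) ]

-- the per-check result dict; notes uses improved.split(".")[1]: split? is some (sep "." ≠ "")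
-- and the literal table always has a [1] component, so neither .getD default is ever taken
def pvEntry (improved : String) (matched : Option String) : List (String × Option String) :=
  [ ("improved_function", some improved),
    ("matched_rule_id", matched),
    ("confidence", if matched.isSome then some "high" else none),
    ("notes", some ("Encryption at rest enabled for " ++
      (PySem.List.pyGet? ((PySem.Str.split? improved ".").getD []) 1).getD "")) ]

-- ===== PORT A =====
-- A's inner loop: first pattern whose filtered matching_rules list is nonempty, its head
def pvFindA (rule_ids : List String) : List String → Option String
  | [] => none
  | p :: ps =>
    match rule_ids.filter (fun r => PySem.Str.isIn p r) with
    | [] => pvFindA rule_ids ps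
    | r :: _ => some r

def create_encryption_mappings (rule_ids : List String) : List (String × List (String × Option String)) :=
  pvChecks.foldl (fun acc c => acc ++ [(c.1, pvEntry c.2.1 (pvFindA rule_ids c.2.2))]) []

-- ===== PORT B =====
-- Source B's innermost statement: 'if p not in index and p in r: index[p] = r'
def pvPStep (r p : String) (idx : PySem.Dict String String) : PySem.Dict String String :=
  if !idx.contains p && PySem.Str.isIn p r then idx.insert p r else idx

-- one rule r against all patterns of all checks
def pvStep (idx : PySem.Dict String String) (r : String) : PySem.Dict String String :=
  pvChecks.foldl (fun idx c => c.2.2.foldl (fun idx p => pvPStep r p idx) idx) idx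

def pvIndex (rule_ids : List String) : PySem.Dict String String :=
  rule_ids.foldl pvStep PySem.Dict.empty

-- 'for p in patterns: if p in index: matched_rule = index[p]; break'
def pvFirstHit (idx : PySem.Dict String String) : List String → Option String
  | [] => none
  | p :: ps =>
    match idx.get? p with
    | some r => some r
    | none => pvFirstHit idx ps

def create_encryption_mappings_alt (rule_ids : List String) : List (String × List (String × Option String)) :=
  let idx := pvIndex rule_ids
  pvChecks.foldl (fun acc c => acc ++ [(c.1, pvEntry c.2.1 (pvFirstHit idx c.2.2))]) []

-- ===== PRECONDITION & SPEC =====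
def Spec_create_encryption_mappings (rule_ids : List String) (out : List (String × List (String × Option String))) : Prop := out = create_encryption_mappings_alt rule_ids
instance (rule_ids : List String) (out : List (String × List (String × Option String))) : Decidable (Spec_create_encryption_mappings rule_ids out) := by unfold Spec_create_encryption_mappings; infer_instance

-- ===== CLAIM (what is proved, stated in full; the proofs are below) =====
def Claim_equal_create_encryption_mappings : Prop := ∀ (rule_ids : List String), Dom_create_encryption_mappings rule_ids → Spec_create_encryption_mappings rule_ids (create_encryption_mappings rule_ids)

-- ===== LEMMAS AND PROOFS =====

-- all eight patterns of the table
def pvAllPats : List String := pvChecks.flatMap (fun c => c.2.2)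

lemma get?_pvPStep (r p : String) (idx : PySem.Dict String String) (p' : String) :
    (pvPStep r p idx).get? p' =
      if p' = p then (idx.get? p').or (if PySem.Str.isIn p r then some r else none)
      else idx.get? p' := by
  unfold pvPStep
  by_cases hpp : p' = p
  · subst hpp
    cases hg : idx.get? p' with
    | some v =>
      have hc : idx.contains p' = true := by
        rw [PySem.Dict.contains_eq_isSome_get?, hg]; rfl
      simp [hc, hg]
    | none =>
      have hc : idx.contains p' = false := by
        rw [PySem.Dict.contains_eq_isSome_get?, hg]; rfl
      by_cases hi : PySem.Chars.isIn p'.toList r.toList = true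
      · simp [hc, hi, PySem.Dict.get?_insert_self]
      · simp [hc, hi, hg]
  · by_cases hcond : (!idx.contains p && PySem.Str.isIn p r) = true
    · rw [if_pos hcond, PySem.Dict.get?_insert_of_ne _ _ hpp, if_neg hpp]
    · rw [if_neg hcond, if_neg hpp]

lemma get?_pvStep (idx : PySem.Dict String String) (r p : String) (hp : p ∈ pvAllPats) :
    (pvStep idx r).get? p = (idx.get? p).or (if PySem.Str.isIn p r then some r else none) := by
  simp only [pvAllPats, pvChecks] at hp
  simp only [pvStep, pvChecks, List.foldl]
  fin_cases hp <;> simp [get?_pvPStep]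

lemma get?_foldl_pvStep (p : String) (hp : p ∈ pvAllPats) :
    ∀ (rs : List String) (idx : PySem.Dict String String),
      (rs.foldl pvStep idx).get? p =
        (idx.get? p).or ((rs.filter (fun r => PySem.Str.isIn p r)).head?) := by
  intro rs
  induction rs with
  | nil => intro idx; simp
  | cons r rs ih =>
    intro idx
    simp only [List.foldl_cons, ih, get?_pvStep idx r p hp, List.filter_cons]
    by_cases hi : PySem.Chars.isIn p.toList r.toList = true
    · cases idx.get? p <;> simp [hi]
    · cases idx.get? p <;> simp [hi]

lemma get?_pvIndex (rule_ids : List String) (p : String) (hp : p ∈ pvAllPats) :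
    (pvIndex rule_ids).get? p = (rule_ids.filter (fun r => PySem.Str.isIn p r)).head? := by
  unfold pvIndex
  rw [get?_foldl_pvStep p hp]
  simp [PySem.Dict.get?_empty]

lemma pvFirstHit_eq (rule_ids : List String) (pats : List String)
    (hsub : ∀ p ∈ pats, p ∈ pvAllPats) :
    pvFirstHit (pvIndex rule_ids) pats = pvFindA rule_ids pats := by
  induction pats with
  | nil => rfl
  | cons p ps ih =>
    simp only [pvFirstHit, pvFindA]
    rw [get?_pvIndex rule_ids p (hsub p (List.mem_cons_self ..))]
    cases hf : rule_ids.filter (fun r => PySem.Str.isIn p r) with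
    | nil => simpa using ih (fun q hq => hsub q (List.mem_cons_of_mem _ hq))
    | cons r rest => simp

-- ===== VERDICT (by name: the statement is the Claim_ definition above) =====
theorem create_encryption_mappings_spec : Claim_equal_create_encryption_mappings := by
  intro rule_ids _
  unfold Spec_create_encryption_mappings create_encryption_mappings create_encryption_mappings_alt
  simp only [pvChecks, List.foldl]
  rw [pvFirstHit_eq rule_ids _ (by decide), pvFirstHit_eq rule_ids _ (by decide),
      pvFirstHit_eq rule_ids _ (by decide), pvFirstHit_eq rule_ids _ (by decide)]
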